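-- pv_equiv track=rewrite | github.com/othmancs/alomrnsa | check_print_arabic/models/amount_to_text_ar.py | _convert_tens
-- ===== SOURCE A (Python) =====
-- to_19 = (u'صفر',u'واحد',u'إثنان',u'ثلاثة',u'أربعة',u'خمسة',u'ستة',u'سبعة',u'ثمانية',u'تسعة',u'عشرة',u'أحدعشر',u'إثناعشر',u'ثلاثةعشر',u'أربعةعشر',u'خمسةعشر',u'ستةعشر',u'سبعةعشر',u'ثمانيةعشر',u'تسعةعشر')
--
-- tens  = (u'عشرون',u'ثلاثون',u'أربعون',u'خمسون',u'ستون',u'سبعون',u'ثمانون',u'تسعون')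
--
-- def _convert_tens(val):
--     if val < 20:
--         return to_19[val]
--     for (dcap, dval) in ((k, 20 + (10 * v)) for (v, k) in enumerate(tens)):
--         if dval + 10 > val:
--             if val % 10:
--                 return  to_19[val % 10]+u' و ' +dcap
--             return dcap
-- ===== SOURCE B (Python) =====
-- to_19 = (u'صفر',u'واحد',u'إثنان',u'ثلاثة',u'أربعة',u'خمسة',u'ستة',u'سبعة',u'ثمانية',u'تسعة',u'عشرة',u'أحدعشر',u'إثناعشر',u'ثلاثةعشر',u'أربعةعشر',u'خمسةعشر',u'ستةعشر',u'سبعةعشر',u'ثمانيةعشر',u'تسعةعشر')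
--
-- tens  = (u'عشرون',u'ثلاثون',u'أربعون',u'خمسون',u'ستون',u'سبعون',u'ثمانون',u'تسعون')
--
-- def _convert_tens(val):
--     if val < 20:
--         return to_19[val]
--     q, r = divmod(val, 10)
--     if r:
--         return to_19[r] + u' و ' + tens[q - 2]
--     return tens[q - 2]
-- ===== Notes on version B (the rewrite author's own statement) =====
-- stated objective: simpler
-- what changed: B replaces A's enumerate-and-scan loop over the tens tuple with a direct divmod computation: the quotient indexes the decade word directly and the remainder, when nonzero, selects the units word to join in front.
-- outside the precondition, e.g. on _convert_tens(100): A returns None, B raises IndexError; on _convert_tens(-21): A raises IndexError, B raises IndexError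
import Mathlib
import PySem

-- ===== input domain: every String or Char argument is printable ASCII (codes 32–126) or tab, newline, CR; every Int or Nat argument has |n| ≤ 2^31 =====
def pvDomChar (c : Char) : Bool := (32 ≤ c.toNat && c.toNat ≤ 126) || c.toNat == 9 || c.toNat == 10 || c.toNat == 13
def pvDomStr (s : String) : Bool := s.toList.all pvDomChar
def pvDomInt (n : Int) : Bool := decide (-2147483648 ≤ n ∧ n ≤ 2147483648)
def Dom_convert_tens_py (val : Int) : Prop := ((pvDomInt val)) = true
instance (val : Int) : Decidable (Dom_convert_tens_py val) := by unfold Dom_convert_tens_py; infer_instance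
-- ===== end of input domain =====

-- B replaces A's scan loop over the tens tuple with a direct divmod index computation (objective: simpler).

-- ===== PORT A =====
def pvTo19 : List String := ["صفر","واحد","إثنان","ثلاثة","أربعة","خمسة","ستة","سبعة","ثمانية","تسعة","عشرة","أحدعشر","إثناعشر","ثلاثةعشر","أربعةعشر","خمسةعشر","ستةعشر","سبعةعشر","ثمانيةعشر","تسعةعشر"]

def pvTens : List String := ["عشرون","ثلاثون","أربعون","خمسون","ستون","سبعون","ثمانون","تسعون"]

-- the for-loop over enumerate(tens); [] = loop exhausted (Python returns None; excluded by Pre_)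
def pvLoopA (val : Int) : List (Int × String) → String
  | [] => ""
  | (v, k) :: rest =>
    let dval : Int := 20 + 10 * v
    if dval + 10 > val then
      if PySem.Int.mod val 10 ≠ 0 then
        ((PySem.List.pyGet? pvTo19 (PySem.Int.mod val 10)).getD "") ++ " و " ++ k
      else k
    else pvLoopA val rest

def convert_tens_py (val : Int) : String :=
  if val < 20 then (PySem.List.pyGet? pvTo19 val).getD ""
  else pvLoopA val (PySem.List.enumerate pvTens)

-- ===== PORT B =====
def convert_tens_py_alt (val : Int) : String :=
  if val < 20 then (PySem.List.pyGet? pvTo19 val).getD ""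
  else
    let q := PySem.Int.floordiv val 10
    let r := PySem.Int.mod val 10
    if r ≠ 0 then
      ((PySem.List.pyGet? pvTo19 r).getD "") ++ " و " ++ ((PySem.List.pyGet? pvTens (q - 2)).getD "")
    else (PySem.List.pyGet? pvTens (q - 2)).getD ""

-- ===== PRECONDITION & SPEC =====
-- Pre_ excludes val ≤ -21, where A raises IndexError, and val ≥ 100, where A falls off its loop
-- and returns None, which is not a string.
def Pre_convert_tens_py (val : Int) : Prop := -20 ≤ val ∧ val < 100
instance (val : Int) : Decidable (Pre_convert_tens_py val) := by unfold Pre_convert_tens_py; infer_instance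
def pvWitness_convert_tens_py : Int := (42)

def Spec_convert_tens_py (val : Int) (out : String) : Prop := out = convert_tens_py_alt val
instance (val : Int) (out : String) : Decidable (Spec_convert_tens_py val out) := by unfold Spec_convert_tens_py; infer_instance

-- ===== CLAIM (what is proved, stated in full; the proofs are below) =====
def Claim_equal_convert_tens_py : Prop := ∀ (val : Int), Dom_convert_tens_py val → Pre_convert_tens_py val → Spec_convert_tens_py val (convert_tens_py val)

-- ===== LEMMAS AND PROOFS =====

-- ===== VERDICT (by name: the statement is the Claim_ definition above) =====
theorem convert_tens_py_spec : Claim_equal_convert_tens_py := by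
  intro val _ hp
  unfold Pre_convert_tens_py at hp
  unfold Spec_convert_tens_py
  obtain ⟨h1, h2⟩ := hp
  interval_cases val <;> decide
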